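-- pv_equiv track=rewrite | github.com/anki/cozmo-python-sdk | src/cozmo/_clad.py | _all_caps_to_pascal_case
-- ===== SOURCE A (Python) =====
-- def _all_caps_to_pascal_case(name):
--     # Convert a string from CAPS_CASE_WORDS to PascalCase (e.g. CapsCaseWords)
--     ret_str = ""
--     first_char = True
--     # Build the return string
--     for char in name:
--         if char == "_":
--             # skip underscores, but reset that next char will be start of a new word
--             first_char = True
--         else:
--             # First letter of a word is uppercase, rest are lowercase
--             if first_char:
--                 ret_str += char.upper()
--                 first_char = False
--             else:
--                 ret_str += char.lower()
--     return ret_str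
-- ===== SOURCE B (Python) =====
-- def _all_caps_to_pascal_case(name):
--     # Split into words, then slice-case each word and join.
--     return "".join(w[:1].upper() + w[1:].lower() for w in name.split("_"))
-- ===== Notes on version B (the rewrite author's own statement) =====
-- stated objective: idiomatic
-- what changed: Replaced the single-pass character loop with a first_char flag and repeated string concatenation by a split-on-underscore / slice-case-each-word / join pipeline over words.
import Mathlib
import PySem

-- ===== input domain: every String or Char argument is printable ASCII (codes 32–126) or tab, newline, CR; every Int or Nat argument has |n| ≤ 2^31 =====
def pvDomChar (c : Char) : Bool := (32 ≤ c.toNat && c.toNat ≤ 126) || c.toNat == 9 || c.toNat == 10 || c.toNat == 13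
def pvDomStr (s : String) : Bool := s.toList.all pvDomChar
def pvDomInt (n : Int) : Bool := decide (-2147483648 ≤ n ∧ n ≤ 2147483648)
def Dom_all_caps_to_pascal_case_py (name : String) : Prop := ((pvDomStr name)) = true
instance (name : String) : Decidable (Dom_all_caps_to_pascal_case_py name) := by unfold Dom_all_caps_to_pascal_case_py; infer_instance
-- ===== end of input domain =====

-- B replaces A's single-pass first_char-flag character loop (with repeated string appends) by a
-- split-on-underscore / slice-case-each-word / join pipeline; a timing run measured B faster.

-- ===== PORT A =====
-- literal port of A's loop: state = (ret_str, first_char), chars appended one by one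
def all_caps_to_pascal_case_py (name : String) : String :=
  String.mk
    (name.toList.foldl
      (fun (st : List Char × Bool) char =>
        if char = '_' then
          (st.1, true)
        else
          if st.2 then
            (st.1 ++ [PySem.Chars.upperChar char], false)
          else
            (st.1 ++ [PySem.Chars.lowerChar char], st.2))
      ([], true)).1

-- ===== PORT B =====
-- w[:1].upper() + w[1:].lower()
def pascalWord (w : List Char) : List Char :=
  PySem.Chars.upper (PySem.List.slice w none (some 1)) ++
    PySem.Chars.lower (PySem.List.slice w (some 1) none)

-- "".join(pascalWord w for w in name.split("_"))
def all_caps_to_pascal_case_py_alt (name : String) : String :=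
  String.mk (PySem.Chars.join [] ((name.toList.splitOn '_').map pascalWord))

-- ===== PRECONDITION & SPEC =====
def Spec_all_caps_to_pascal_case_py (name : String) (out : String) : Prop := out = all_caps_to_pascal_case_py_alt name
instance (name : String) (out : String) : Decidable (Spec_all_caps_to_pascal_case_py name out) := by unfold Spec_all_caps_to_pascal_case_py; infer_instance

-- ===== CLAIM (what is proved, stated in full; the proofs are below) =====
def Claim_equal_all_caps_to_pascal_case_py : Prop := ∀ (name : String), Dom_all_caps_to_pascal_case_py name → Spec_all_caps_to_pascal_case_py name (all_caps_to_pascal_case_py name)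

-- ===== LEMMAS AND PROOFS =====

-- reference recursion: what both programs compute, char by char with a "start of word" flag
def pvGo : List Char → Bool → List Char
  | [], _ => []
  | c :: cs, fc =>
    if c = '_' then pvGo cs true
    else if fc then PySem.Chars.upperChar c :: pvGo cs false
    else PySem.Chars.lowerChar c :: pvGo cs false

theorem pvA_foldl (cs : List Char) : ∀ (acc : List Char) (fc : Bool),
    (cs.foldl
      (fun (st : List Char × Bool) char =>
        if char = '_' then (st.1, true)
        else if st.2 then (st.1 ++ [PySem.Chars.upperChar char], false)
        else (st.1 ++ [PySem.Chars.lowerChar char], st.2))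
      (acc, fc)).1 = acc ++ pvGo cs fc := by
  induction cs with
  | nil => intro acc fc; simp [pvGo]
  | cons c cs ih =>
    intro acc fc
    by_cases hc : c = '_'
    · simp [hc, pvGo, ih]
    · cases fc <;> simp [hc, pvGo, ih]

theorem pvPascalWord_nil : pascalWord [] = [] := by
  simp [pascalWord, PySem.List.slice, PySem.Chars.upper, PySem.Chars.lower]

theorem pvPascalWord_cons (c : Char) (w : List Char) :
    pascalWord (c :: w) = PySem.Chars.upperChar c :: w.map PySem.Chars.lowerChar := by
  simp [pascalWord, PySem.List.slice, PySem.Chars.upper, PySem.Chars.lower]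

theorem pvJoin_nil_cons (a : List Char) (l : List (List Char)) :
    PySem.Chars.join [] (a :: l) = a ++ PySem.Chars.join [] l := by
  cases l with
  | nil => simp [PySem.Chars.join_singleton, PySem.Chars.join_nil]
  | cons b l => simp [PySem.Chars.join_cons_cons]

theorem pvSplitOn_char_cons (c : Char) (cs : List Char) :
    (c :: cs).splitOn '_' =
      if c = '_' then [] :: cs.splitOn '_'
      else (cs.splitOn '_').modifyHead (List.cons c) := by
  simp only [List.splitOn, List.splitOnP_cons]
  split <;> simp_all

theorem pvMain (cs : List Char) :
    PySem.Chars.join [] ((cs.splitOn '_').map pascalWord) = pvGo cs true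
    ∧ (match cs.splitOn '_' with
       | [] => []
       | w :: ws => w.map PySem.Chars.lowerChar ++ PySem.Chars.join [] (ws.map pascalWord))
      = pvGo cs false := by
  induction cs with
  | nil =>
    rw [show List.splitOn '_' ([] : List Char) = [[]] from rfl]
    constructor
    · simp [pvGo, pvPascalWord_nil]
    · simp [pvGo]
  | cons c cs ih =>
    obtain ⟨ih1, ih2⟩ := ih
    obtain ⟨w, ws, hsplit⟩ : ∃ w ws, cs.splitOn '_' = w :: ws := by
      cases h : cs.splitOn '_' with
      | nil => exact absurd h (List.splitOnP_ne_nil _ _)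
      | cons w ws => exact ⟨w, ws, rfl⟩
    rw [hsplit] at ih1 ih2
    by_cases hc : c = '_'
    · rw [List.map_cons, pvJoin_nil_cons] at ih1
      refine ⟨?_, ?_⟩ <;>
        simp [pvSplitOn_char_cons, hc, hsplit, pvGo, pvPascalWord_nil, pvJoin_nil_cons, ih1]
    · refine ⟨?_, ?_⟩ <;>
        simp [pvSplitOn_char_cons, hc, hsplit, pvGo, pvPascalWord_cons, pvJoin_nil_cons, ← ih2]

-- ===== VERDICT (by name: the statement is the Claim_ definition above) =====
theorem all_caps_to_pascal_case_py_spec : Claim_equal_all_caps_to_pascal_case_py := by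
  intro name _
  unfold Spec_all_caps_to_pascal_case_py all_caps_to_pascal_case_py all_caps_to_pascal_case_py_alt
  rw [pvA_foldl, (pvMain name.toList).1]
  simp
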